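-- pv_equiv track=rewrite | github.com/lentscode/aoc | 4.py | printing
-- ===== SOURCE A (Python) =====
-- def printing(rolls: list[str]) -> int:
--     n = 0
--     vlen = len(rolls)
--     hlen = len(rolls[0])
--
--     for i in range(len(rolls)):
--         for j in range(len(rolls[i])):
--             if rolls[i][j] != "@":
--                 continue
--
--             adj = 0
--             if i - 1 >= 0:
--                 if j - 1 >= 0 and rolls[i - 1][j - 1] == "@":
--                     adj += 1
--                 if rolls[i - 1][j] == "@":
--                     adj += 1
--                 if j + 1 < hlen and rolls[i - 1][j + 1] == "@":
--                     adj += 1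
--
--             if i + 1 < vlen:
--                 if j - 1 >= 0 and rolls[i + 1][j - 1] == "@":
--                     adj += 1
--                 if rolls[i + 1][j] == "@":
--                     adj += 1
--                 if j + 1 < hlen and rolls[i + 1][j + 1] == "@":
--                     adj += 1
--
--             if j - 1 >= 0:
--                 if rolls[i][j - 1] == "@":
--                     adj += 1
--
--             if j + 1 < hlen:
--                 if rolls[i][j + 1] == "@":
--                     adj += 1
--
--             if adj < 4:
--                 n += 1
--
--     return n
-- ===== SOURCE B (Python) =====
-- def _at(grid, i, j):
--     if 0 <= i < len(grid) and 0 <= j < len(grid[i]):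
--         return grid[i][j]
--     return 0
--
--
-- def printing(rolls: list[str]) -> int:
--     # Staged separable passes: 0/1 indicator grid, horizontal 3-sums, then
--     # vertical combination of three precomputed row sums minus the cell itself.
--     ind = [[1 if c == "@" else 0 for c in row] for row in rolls]
--     hsum = [[_at(ind, i, j - 1) + ind[i][j] + _at(ind, i, j + 1)
--              for j in range(len(ind[i]))] for i in range(len(ind))]
--     return sum(1
--                for i in range(len(ind))
--                for j in range(len(ind[i]))
--                if ind[i][j] and _at(hsum, i - 1, j) + hsum[i][j] + _at(hsum, i + 1, j) - 1 < 4)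
-- ===== Notes on version B (the rewrite author's own statement) =====
-- stated objective: alternative
-- what changed: B replaces A's per-cell eight unrolled bounds-checked neighbour probes by staged separable passes: it builds a 0/1 indicator grid, precomputes per-row horizontal 3-sums in one pass, and then gets each cell's neighbour count as the sum of three precomputed row sums minus the cell itself.
-- outside the precondition, e.g. on printing([]): A raises IndexError, B returns 0; on printing(['@', '@', '@}', '@@', '@}', '@@']): A returns 8, B returns 7
import Mathlib
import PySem

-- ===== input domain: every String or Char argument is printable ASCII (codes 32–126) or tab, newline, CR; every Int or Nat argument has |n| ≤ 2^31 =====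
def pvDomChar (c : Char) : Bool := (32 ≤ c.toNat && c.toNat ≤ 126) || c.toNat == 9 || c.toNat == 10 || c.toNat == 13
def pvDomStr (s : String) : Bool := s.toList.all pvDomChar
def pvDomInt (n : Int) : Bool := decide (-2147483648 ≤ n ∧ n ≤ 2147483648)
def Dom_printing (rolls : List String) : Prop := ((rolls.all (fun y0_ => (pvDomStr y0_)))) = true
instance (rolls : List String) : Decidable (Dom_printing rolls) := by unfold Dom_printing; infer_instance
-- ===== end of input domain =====

-- B computes neighbour counts by staged separable passes (indicator grid, then per-row
-- horizontal 3-sums, then three precomputed row sums minus the cell) instead of A's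
-- per-cell eight bounds-checked character probes (objective: alternative).

-- ===== PORT A =====
-- rolls[i] / rolls[i][j], total forms: in range on every access A makes on inputs in Pre_printing
def pvRowA (rolls : List String) (i : Int) : List Char := (PySem.List.pyGetD rolls i "").toList
def pvAtA (rolls : List String) (i j : Int) : Char := PySem.List.pyGetD (pvRowA rolls i) j ' '

-- the 'adj' block of A's inner loop, transliterated line by line
def pvAdjA (rolls : List String) (vlen hlen i j : Int) : Int :=
  let adj : Int := 0
  let adj :=
    if 0 ≤ i - 1 then
      let adj := if 0 ≤ j - 1 ∧ pvAtA rolls (i - 1) (j - 1) = '@' then adj + 1 else adj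
      let adj := if pvAtA rolls (i - 1) j = '@' then adj + 1 else adj
      if j + 1 < hlen ∧ pvAtA rolls (i - 1) (j + 1) = '@' then adj + 1 else adj
    else adj
  let adj :=
    if i + 1 < vlen then
      let adj := if 0 ≤ j - 1 ∧ pvAtA rolls (i + 1) (j - 1) = '@' then adj + 1 else adj
      let adj := if pvAtA rolls (i + 1) j = '@' then adj + 1 else adj
      if j + 1 < hlen ∧ pvAtA rolls (i + 1) (j + 1) = '@' then adj + 1 else adj
    else adj
  let adj := if 0 ≤ j - 1 ∧ pvAtA rolls i (j - 1) = '@' then adj + 1 else adj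
  let adj := if j + 1 < hlen ∧ pvAtA rolls i (j + 1) = '@' then adj + 1 else adj
  adj

def printing (rolls : List String) : Int :=
  let vlen : Int := PySem.List.len rolls
  let hlen : Int := PySem.List.len (pvRowA rolls 0)
  (PySem.List.pyRange 0 vlen 1).foldl (fun n i =>
    (PySem.List.pyRange 0 (PySem.List.len (pvRowA rolls i)) 1).foldl (fun n j =>
      if pvAtA rolls i j ≠ '@' then n
      else if pvAdjA rolls vlen hlen i j < 4 then n + 1 else n) n) 0

-- ===== PORT B =====
-- _at(grid, i, j): bounds-checked lookup into a list-of-lists grid, 0 outside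
def pvAt2 (grid : List (List Int)) (i j : Int) : Int :=
  if 0 ≤ i ∧ i < PySem.List.len grid ∧ 0 ≤ j ∧ j < PySem.List.len (PySem.List.pyGetD grid i []) then
    PySem.List.pyGetD (PySem.List.pyGetD grid i []) j 0
  else 0

-- ind = [[1 if c == "@" else 0 for c in row] for row in rolls]
def pvIndB (rolls : List String) : List (List Int) :=
  rolls.map (fun row => row.toList.map (fun c => if c = '@' then (1 : Int) else 0))

-- hsum = [[_at(ind,i,j-1) + ind[i][j] + _at(ind,i,j+1) for j ...] for i ...]
def pvHsumB (rolls : List String) : List (List Int) :=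
  let ind := pvIndB rolls
  (PySem.List.pyRange 0 (PySem.List.len ind) 1).map (fun i =>
    (PySem.List.pyRange 0 (PySem.List.len (PySem.List.pyGetD ind i [])) 1).map (fun j =>
      pvAt2 ind i (j - 1) + PySem.List.pyGetD (PySem.List.pyGetD ind i []) j 0 + pvAt2 ind i (j + 1)))

def printing_alt (rolls : List String) : Int :=
  let ind := pvIndB rolls
  let hsum := pvHsumB rolls
  (PySem.List.pyRange 0 (PySem.List.len ind) 1).foldl (fun n i =>
    (PySem.List.pyRange 0 (PySem.List.len (PySem.List.pyGetD ind i [])) 1).foldl (fun n j =>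
      if PySem.List.pyGetD (PySem.List.pyGetD ind i []) j 0 ≠ 0 ∧
         pvAt2 hsum (i - 1) j + PySem.List.pyGetD (PySem.List.pyGetD hsum i []) j 0 +
           pvAt2 hsum (i + 1) j - 1 < 4
      then n + 1 else n) n) 0

-- ===== PRECONDITION & SPEC =====
-- Pre_ excludes the empty list (A raises IndexError on rolls[0]) and ragged grids where some '@'
-- cell has a neighbouring position that A's row-0-width bounds either index beyond its row's
-- actual length (IndexError) or skip entirely.
def Pre_printing (rolls : List String) : Prop :=
  rolls ≠ [] ∧
  ∀ i ∈ PySem.List.pyRange 0 (PySem.List.len rolls) 1,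
    ∀ j ∈ PySem.List.pyRange 0 (PySem.List.len (pvRowA rolls i)) 1,
      pvAtA rolls i j = '@' →
        ((0 ≤ i - 1 → j < PySem.List.len (pvRowA rolls (i - 1)) ∧
            (j + 1 < PySem.List.len (pvRowA rolls 0) →
              j + 1 < PySem.List.len (pvRowA rolls (i - 1)))) ∧
         (i + 1 < PySem.List.len rolls → j < PySem.List.len (pvRowA rolls (i + 1)) ∧
            (j + 1 < PySem.List.len (pvRowA rolls 0) →
              j + 1 < PySem.List.len (pvRowA rolls (i + 1)))) ∧
         (j + 1 < PySem.List.len (pvRowA rolls 0) → j + 1 < PySem.List.len (pvRowA rolls i)) ∧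
         (PySem.List.len (pvRowA rolls 0) ≤ j + 1 →
            pvAtA rolls (i - 1) (j + 1) ≠ '@' ∧ pvAtA rolls i (j + 1) ≠ '@' ∧
            pvAtA rolls (i + 1) (j + 1) ≠ '@'))
instance (rolls : List String) : Decidable (Pre_printing rolls) := by unfold Pre_printing; infer_instance

def pvWitness_printing : List String := ["@@.", ".@.", "..@"]

def Spec_printing (rolls : List String) (out : Int) : Prop := out = printing_alt rolls
instance (rolls : List String) (out : Int) : Decidable (Spec_printing rolls out) := by unfold Spec_printing; infer_instance

-- ===== CLAIM (what is proved, stated in full; the proofs are below) =====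
def Claim_equal_printing : Prop := ∀ (rolls : List String), Dom_printing rolls → Pre_printing rolls → Spec_printing rolls (printing rolls)

-- ===== LEMMAS AND PROOFS =====

-- (if c then x+1 else x) is x + an indicator
theorem pv_ite_add_one {c : Prop} [Decidable c] (x : Int) :
    (if c then x + 1 else x) = x + (if c then (1 : Int) else 0) := by
  split_ifs <;> ring

-- the '@'-indicator at a position, total (0 outside the grid): the value every
-- grid access of B denotes
def pvB (rolls : List String) (x y : Int) : Int :=
  if 0 ≤ x ∧ x < (rolls.length : Int) ∧ 0 ≤ y ∧ y < ((pvRowA rolls x).length : Int) ∧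
     pvAtA rolls x y = '@' then 1 else 0

theorem pv_ind_row (rolls : List String) (x : Int) :
    PySem.List.pyGetD (pvIndB rolls) x [] =
      (pvRowA rolls x).map (fun c => if c = '@' then (1 : Int) else 0) := by
  have h := PySem.List.pyGetD_map
    (fun row : String => row.toList.map (fun c => if c = '@' then (1 : Int) else 0)) rolls x ""
  simpa [pvIndB, pvRowA] using h

theorem pv_ind_entry (rolls : List String) (x y : Int) :
    PySem.List.pyGetD (PySem.List.pyGetD (pvIndB rolls) x []) y 0 =
      (if pvAtA rolls x y = '@' then (1 : Int) else 0) := by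
  rw [pv_ind_row]
  have h := PySem.List.pyGetD_map (fun c : Char => if c = '@' then (1 : Int) else 0)
    (pvRowA rolls x) y ' '
  simpa [pvAtA] using h

theorem pv_ind_len (rolls : List String) : (pvIndB rolls).length = rolls.length := by
  simp [pvIndB]

theorem pv_ind_row_len (rolls : List String) (x : Int) :
    (PySem.List.pyGetD (pvIndB rolls) x []).length = (pvRowA rolls x).length := by
  rw [pv_ind_row]; simp

-- _at on the indicator grid is the total indicator pvB
theorem pv_at2_ind (rolls : List String) (x y : Int) :
    pvAt2 (pvIndB rolls) x y = pvB rolls x y := by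
  unfold pvAt2 pvB
  rw [pv_ind_entry, PySem.List.len_eq, PySem.List.len_eq, pv_ind_len, pv_ind_row_len]
  split_ifs with h1 h2 h3 h4 <;> first | rfl | (exfalso; tauto)

-- hsum rows: length and entries
theorem pv_hsum_row (rolls : List String) (k : Nat) (hk : k < rolls.length) :
    PySem.List.pyGetD (pvHsumB rolls) (k : Int) [] =
      (PySem.List.pyRange 0 (((pvRowA rolls (k : Int)).length : Nat) : Int) 1).map (fun j =>
        pvAt2 (pvIndB rolls) (k : Int) (j - 1) +
        PySem.List.pyGetD (PySem.List.pyGetD (pvIndB rolls) (k : Int) []) j 0 +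
        pvAt2 (pvIndB rolls) (k : Int) (j + 1)) := by
  simp only [pvHsumB, PySem.List.len_eq, pv_ind_len, pv_ind_row_len]
  exact PySem.List.pyGetD_map_pyRange _ rolls.length k [] hk

theorem pv_hsum_len (rolls : List String) : (pvHsumB rolls).length = rolls.length := by
  unfold pvHsumB
  simp [PySem.List.length_pyRange_one, PySem.List.len_eq, pv_ind_len]

theorem pv_hsum_row_len (rolls : List String) (k : Nat) (hk : k < rolls.length) :
    (PySem.List.pyGetD (pvHsumB rolls) (k : Int) []).length = (pvRowA rolls (k : Int)).length := by
  rw [pv_hsum_row rolls k hk]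
  simp [PySem.List.length_pyRange_one]

theorem pv_hsum_entry (rolls : List String) (x y : Int)
    (hx0 : 0 ≤ x) (hx1 : x < (rolls.length : Int))
    (hy0 : 0 ≤ y) (hy1 : y < ((pvRowA rolls x).length : Int)) :
    PySem.List.pyGetD (PySem.List.pyGetD (pvHsumB rolls) x []) y 0 =
      pvB rolls x (y - 1) + pvB rolls x y + pvB rolls x (y + 1) := by
  obtain ⟨k, rfl⟩ : ∃ k : Nat, x = (k : Int) := ⟨x.toNat, (Int.toNat_of_nonneg hx0).symm⟩
  obtain ⟨m, rfl⟩ : ∃ m : Nat, y = (m : Int) := ⟨y.toNat, (Int.toNat_of_nonneg hy0).symm⟩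
  have hk : k < rolls.length := by exact_mod_cast hx1
  have hm : m < (pvRowA rolls (k : Int)).length := by exact_mod_cast hy1
  rw [pv_hsum_row rolls k hk]
  rw [PySem.List.pyGetD_map_pyRange _ _ m 0 hm]
  rw [pv_at2_ind, pv_at2_ind, pv_ind_entry]
  have : pvB rolls (k : Int) (m : Int) = (if pvAtA rolls (k : Int) (m : Int) = '@' then (1:Int) else 0) := by
    unfold pvB
    have h0 : (0:Int) ≤ (k:Int) := by positivity
    have h2 : (0:Int) ≤ (m:Int) := by positivity
    split_ifs with ha hb hb <;> first | rfl | (exfalso; tauto)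
  rw [this]

-- _at on hsum, as a guarded triple of indicators
theorem pv_at2_hsum (rolls : List String) (x j : Int) (hj0 : 0 ≤ j) :
    pvAt2 (pvHsumB rolls) x j =
      if 0 ≤ x ∧ x < (rolls.length : Int) ∧ j < ((pvRowA rolls x).length : Int) then
        pvB rolls x (j - 1) + pvB rolls x j + pvB rolls x (j + 1)
      else 0 := by
  unfold pvAt2
  rw [PySem.List.len_eq, PySem.List.len_eq, pv_hsum_len]
  by_cases hx : 0 ≤ x ∧ x < (rolls.length : Int)
  · obtain ⟨k, rfl⟩ : ∃ k : Nat, x = (k : Int) := ⟨x.toNat, (Int.toNat_of_nonneg hx.1).symm⟩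
    have hk : k < rolls.length := by exact_mod_cast hx.2
    rw [pv_hsum_row_len rolls k hk]
    by_cases hjr : j < ((pvRowA rolls (k : Int)).length : Int)
    · rw [if_pos ⟨hx.1, hx.2, hj0, hjr⟩, if_pos ⟨hx.1, hx.2, hjr⟩]
      exact pv_hsum_entry rolls _ j hx.1 hx.2 hj0 hjr
    · rw [if_neg (by tauto), if_neg (by tauto)]
  · rw [if_neg (by tauto), if_neg (by tauto)]

-- the core per-cell fact: under Pre_'s local conditions, A's adj equals B's
-- three-row-sums-minus-one neighbour count
theorem pv_ite_block {c : Prop} [Decidable c] (x a b d : Int) :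
    (if c then ((x + a) + b) + d else x) = x + (if c then a + b + d else 0) := by
  split_ifs <;> ring

set_option maxHeartbeats 1600000 in
theorem pv_adj_eq (rolls : List String) (i j : Int)
    (hi0 : 0 ≤ i) (hi1 : i < (rolls.length : Int))
    (hj0 : 0 ≤ j) (hj1 : j < ((pvRowA rolls i).length : Int))
    (hc : pvAtA rolls i j = '@')
    (hP : (0 ≤ i - 1 → j < ((pvRowA rolls (i - 1)).length : Int) ∧
            (j + 1 < ((pvRowA rolls 0).length : Int) →
              j + 1 < ((pvRowA rolls (i - 1)).length : Int))) ∧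
          (i + 1 < (rolls.length : Int) → j < ((pvRowA rolls (i + 1)).length : Int) ∧
            (j + 1 < ((pvRowA rolls 0).length : Int) →
              j + 1 < ((pvRowA rolls (i + 1)).length : Int))) ∧
          (j + 1 < ((pvRowA rolls 0).length : Int) → j + 1 < ((pvRowA rolls i).length : Int)) ∧
          (((pvRowA rolls 0).length : Int) ≤ j + 1 →
            pvAtA rolls (i - 1) (j + 1) ≠ '@' ∧ pvAtA rolls i (j + 1) ≠ '@' ∧
            pvAtA rolls (i + 1) (j + 1) ≠ '@')) :
    pvAdjA rolls (rolls.length : Int) ((pvRowA rolls 0).length : Int) i j =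
      pvAt2 (pvHsumB rolls) (i - 1) j +
        PySem.List.pyGetD (PySem.List.pyGetD (pvHsumB rolls) i []) j 0 +
        pvAt2 (pvHsumB rolls) (i + 1) j - 1 := by
  obtain ⟨p1, p2, p3, p4⟩ := hP
  rw [pv_at2_hsum rolls (i - 1) j hj0, pv_at2_hsum rolls (i + 1) j hj0,
    pv_hsum_entry rolls i j hi0 hi1 hj0 hj1]
  have a1 : 0 ≤ i - 1 → j < ((pvRowA rolls (i - 1)).length : Int) := fun hg => (p1 hg).1
  have a1' : 0 ≤ i - 1 → j + 1 < ((pvRowA rolls 0).length : Int) →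
      j + 1 < ((pvRowA rolls (i - 1)).length : Int) := fun hg hb => (p1 hg).2 hb
  have a2 : i + 1 < (rolls.length : Int) → j < ((pvRowA rolls (i + 1)).length : Int) :=
    fun hg => (p2 hg).1
  have a2' : i + 1 < (rolls.length : Int) → j + 1 < ((pvRowA rolls 0).length : Int) →
      j + 1 < ((pvRowA rolls (i + 1)).length : Int) := fun hg hb => (p2 hg).2 hb
  have b1 : ¬ j + 1 < ((pvRowA rolls 0).length : Int) → ¬ pvAtA rolls (i - 1) (j + 1) = '@' :=
    fun hg => (p4 (by omega)).1
  have b2 : ¬ j + 1 < ((pvRowA rolls 0).length : Int) → ¬ pvAtA rolls i (j + 1) = '@' :=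
    fun hg => (p4 (by omega)).2.1
  have b3 : ¬ j + 1 < ((pvRowA rolls 0).length : Int) → ¬ pvAtA rolls (i + 1) (j + 1) = '@' :=
    fun hg => (p4 (by omega)).2.2
  have brw : ∀ x y : Int, 0 ≤ x → x < (rolls.length : Int) → 0 ≤ y →
      y < ((pvRowA rolls x).length : Int) →
      pvB rolls x y = if pvAtA rolls x y = '@' then 1 else 0 := by
    intro x y h1 h2 h3 h4
    unfold pvB
    by_cases h5 : pvAtA rolls x y = '@'
    · rw [if_pos ⟨h1, h2, h3, h4, h5⟩, if_pos h5]
    · rw [if_neg (fun hcon => h5 hcon.2.2.2.2), if_neg h5]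
  have bzc : ∀ x y : Int, ¬ pvAtA rolls x y = '@' → pvB rolls x y = 0 := by
    intro x y h
    unfold pvB
    rw [if_neg (fun hcon => h hcon.2.2.2.2)]
  have bzn : ∀ x y : Int, ¬ 0 ≤ y → pvB rolls x y = 0 := by
    intro x y h
    unfold pvB
    rw [if_neg (fun hcon => h hcon.2.2.1)]
  have Etl : (if 0 ≤ i - 1 ∧ i - 1 < (rolls.length : Int) ∧
        j < ((pvRowA rolls (i - 1)).length : Int) then
        pvB rolls (i - 1) (j - 1) + pvB rolls (i - 1) j + pvB rolls (i - 1) (j + 1) else 0) =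
      if 0 ≤ i - 1 then
        ((if 0 ≤ j - 1 ∧ pvAtA rolls (i - 1) (j - 1) = '@' then (1 : Int) else 0) +
         (if pvAtA rolls (i - 1) j = '@' then (1 : Int) else 0)) +
         (if j + 1 < ((pvRowA rolls 0).length : Int) ∧ pvAtA rolls (i - 1) (j + 1) = '@'
            then (1 : Int) else 0)
      else 0 := by
    by_cases g1 : 0 ≤ i - 1
    · have hl : i - 1 < (rolls.length : Int) := by omega
      have hr : j < ((pvRowA rolls (i - 1)).length : Int) := a1 g1
      rw [if_pos ⟨g1, hl, hr⟩, if_pos g1]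
      have t1 : pvB rolls (i - 1) (j - 1) =
          if 0 ≤ j - 1 ∧ pvAtA rolls (i - 1) (j - 1) = '@' then (1 : Int) else 0 := by
        by_cases hj : 0 ≤ j - 1
        · rw [brw _ _ g1 hl hj (by omega)]; simp [show (1:Int) ≤ j by omega]
        · rw [bzn _ _ hj]; simp [show ¬(1:Int) ≤ j by omega]
      have t2 : pvB rolls (i - 1) j = if pvAtA rolls (i - 1) j = '@' then (1 : Int) else 0 :=
        brw _ _ g1 hl hj0 hr
      have t3 : pvB rolls (i - 1) (j + 1) =
          if j + 1 < ((pvRowA rolls 0).length : Int) ∧ pvAtA rolls (i - 1) (j + 1) = '@'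
            then (1 : Int) else 0 := by
        by_cases hh : j + 1 < ((pvRowA rolls 0).length : Int)
        · rw [brw _ _ g1 hl (by omega) (a1' g1 hh)]; simp [hh]
        · rw [bzc _ _ (b1 hh)]; simp [hh]
      rw [t1, t2, t3]
    · rw [if_neg (fun hcon => g1 hcon.1), if_neg g1]
  have Ebot : (if 0 ≤ i + 1 ∧ i + 1 < (rolls.length : Int) ∧
        j < ((pvRowA rolls (i + 1)).length : Int) then
        pvB rolls (i + 1) (j - 1) + pvB rolls (i + 1) j + pvB rolls (i + 1) (j + 1) else 0) =
      if i + 1 < (rolls.length : Int) then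
        ((if 0 ≤ j - 1 ∧ pvAtA rolls (i + 1) (j - 1) = '@' then (1 : Int) else 0) +
         (if pvAtA rolls (i + 1) j = '@' then (1 : Int) else 0)) +
         (if j + 1 < ((pvRowA rolls 0).length : Int) ∧ pvAtA rolls (i + 1) (j + 1) = '@'
            then (1 : Int) else 0)
      else 0 := by
    by_cases g2 : i + 1 < (rolls.length : Int)
    · have h0 : (0 : Int) ≤ i + 1 := by omega
      have hr : j < ((pvRowA rolls (i + 1)).length : Int) := a2 g2
      rw [if_pos ⟨h0, g2, hr⟩, if_pos g2]
      have t1 : pvB rolls (i + 1) (j - 1) =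
          if 0 ≤ j - 1 ∧ pvAtA rolls (i + 1) (j - 1) = '@' then (1 : Int) else 0 := by
        by_cases hj : 0 ≤ j - 1
        · rw [brw _ _ h0 g2 hj (by omega)]; simp [show (1:Int) ≤ j by omega]
        · rw [bzn _ _ hj]; simp [show ¬(1:Int) ≤ j by omega]
      have t2 : pvB rolls (i + 1) j = if pvAtA rolls (i + 1) j = '@' then (1 : Int) else 0 :=
        brw _ _ h0 g2 hj0 hr
      have t3 : pvB rolls (i + 1) (j + 1) =
          if j + 1 < ((pvRowA rolls 0).length : Int) ∧ pvAtA rolls (i + 1) (j + 1) = '@'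
            then (1 : Int) else 0 := by
        by_cases hh : j + 1 < ((pvRowA rolls 0).length : Int)
        · rw [brw _ _ h0 g2 (by omega) (a2' g2 hh)]; simp [hh]
        · rw [bzc _ _ (b3 hh)]; simp [hh]
      rw [t1, t2, t3]
    · rw [if_neg (fun hcon => g2 hcon.2.1), if_neg g2]
  have Eml : pvB rolls i (j - 1) =
      if 0 ≤ j - 1 ∧ pvAtA rolls i (j - 1) = '@' then (1 : Int) else 0 := by
    by_cases hj : 0 ≤ j - 1
    · rw [brw _ _ hi0 hi1 hj (by omega)]; simp [show (1:Int) ≤ j by omega]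
    · rw [bzn _ _ hj]; simp [show ¬(1:Int) ≤ j by omega]
  have Emc : pvB rolls i j = 1 := by
    rw [brw _ _ hi0 hi1 hj0 hj1, if_pos hc]
  have Emr : pvB rolls i (j + 1) =
      if j + 1 < ((pvRowA rolls 0).length : Int) ∧ pvAtA rolls i (j + 1) = '@'
        then (1 : Int) else 0 := by
    by_cases hh : j + 1 < ((pvRowA rolls 0).length : Int)
    · rw [brw _ _ hi0 hi1 (by omega) (p3 hh)]; simp [hh]
    · rw [bzc _ _ (b2 hh)]; simp [hh]
  rw [Etl, Ebot, Eml, Emc, Emr]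
  simp only [pvAdjA, pv_ite_add_one, pv_ite_block]
  ring

theorem pv_main (rolls : List String) (hPre : Pre_printing rolls) :
    printing rolls = printing_alt rolls := by
  simp only [printing, printing_alt, PySem.List.len_eq, pv_ind_len, pv_ind_row_len, pv_ind_entry]
  refine PySem.List.foldl_congr_mem _ _ _ _ ?_
  intro n i hi
  refine PySem.List.foldl_congr_mem _ _ _ _ ?_
  intro acc j hj
  have hi' := PySem.List.mem_pyRange_one.mp hi
  have hj' := PySem.List.mem_pyRange_one.mp hj
  by_cases hc : pvAtA rolls i j = '@'
  · have hP := hPre.2 i (by rw [PySem.List.mem_pyRange_one, PySem.List.len_eq]; exact hi')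
      j (by rw [PySem.List.mem_pyRange_one, PySem.List.len_eq]; exact hj') hc
    simp only [PySem.List.len_eq] at hP
    have hA := pv_adj_eq rolls i j hi'.1 hi'.2 hj'.1 hj'.2 hc hP
    simp only [hA]
    simp [hc]
  · simp [hc]

-- ===== VERDICT (by name: the statement is the Claim_ definition above) =====
theorem printing_spec : Claim_equal_printing := by
  intro rolls _ hPre
  exact pv_main rolls hPre
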